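-- pv_equiv track=rewrite | github.com/rebuilder945/FL_research | ast_research/python_code_5.23/lastterm_page10/success_code/胡远卓-2796-2023-05-30_17_58_02.py | findigits
-- ===== SOURCE A (Python) =====
-- def findigits(str):
--       res,tmp="",""
--       for x in str:
--             if x>='0' and x<='9':
--                   tmp+=x
--             else:
--                   tmp=""
--             if len(tmp)>=len(res):
--                   res=tmp
--       return res
-- ===== SOURCE B (Python) =====
-- def findigits(str):
--     runs = []
--     cur = ""
--     for x in str:
--         if '0' <= x <= '9':
--             cur += x
--         else:
--             if cur:
--                 runs.append(cur)
--             cur = ""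
--     if cur:
--         runs.append(cur)
--     best = ""
--     for r in runs:
--         if len(r) >= len(best):
--             best = r
--     return best
-- ===== Notes on version B (the rewrite author's own statement) =====
-- stated objective: alternative
-- what changed: B splits the string into maximal digit runs in one grouping pass and then separately picks the last run of maximal length, instead of A's fused loop that rebinds the best-so-far string at every character.
import Mathlib
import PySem

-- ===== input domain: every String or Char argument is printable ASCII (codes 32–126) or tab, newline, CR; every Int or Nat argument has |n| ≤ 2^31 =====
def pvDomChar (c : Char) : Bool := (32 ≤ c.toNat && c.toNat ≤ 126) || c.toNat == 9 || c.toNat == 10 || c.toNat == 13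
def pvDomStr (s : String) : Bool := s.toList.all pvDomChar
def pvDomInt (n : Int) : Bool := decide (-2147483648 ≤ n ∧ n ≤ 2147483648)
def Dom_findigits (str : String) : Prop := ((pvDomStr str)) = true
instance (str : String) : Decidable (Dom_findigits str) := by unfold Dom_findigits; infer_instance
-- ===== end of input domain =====

-- B splits the string into maximal digit runs and then takes the last longest run, instead of A's fused best-so-far loop; same result, different decomposition.

-- ===== PORT A =====
-- state (res, tmp); one step of A's loop body
def findigitsLoop (st : List Char × List Char) (c : Char) : List Char × List Char :=
  let tmp := if '0' ≤ c ∧ c ≤ '9' then st.2 ++ [c] else []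
  let res := if st.1.length ≤ tmp.length then tmp else st.1
  (res, tmp)

def findigits (str : String) : String :=
  String.ofList (str.toList.foldl findigitsLoop ([], [])).1

-- ===== PORT B =====
-- state (runs, cur); one step of Source B's grouping loop
def runStep (st : List (List Char) × List Char) (c : Char) : List (List Char) × List Char :=
  if '0' ≤ c ∧ c ≤ '9' then (st.1, st.2 ++ [c])
  else (if st.2 = [] then st.1 else st.1 ++ [st.2], [])

def findigits_alt (str : String) : String :=
  let p := str.toList.foldl runStep ([], [])
  let runs := if p.2 = [] then p.1 else p.1 ++ [p.2]
  String.ofList (runs.foldl (fun best r => if best.length ≤ r.length then r else best) [])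

-- ===== PRECONDITION & SPEC =====
def Spec_findigits (str : String) (out : String) : Prop := out = findigits_alt str
instance (str : String) (out : String) : Decidable (Spec_findigits str out) := by unfold Spec_findigits; infer_instance

-- ===== CLAIM (what is proved, stated in full; the proofs are below) =====
def Claim_equal_findigits : Prop := ∀ (str : String), Dom_findigits str → Spec_findigits str (findigits str)

-- ===== LEMMAS AND PROOFS =====

-- recursive form of B's run grouping, used only in the proofs
def runsAux (cs : List Char) (cur : List Char) : List (List Char) :=
  match cs with
  | [] => if cur = [] then [] else [cur]
  | c :: cs =>
    if '0' ≤ c ∧ c ≤ '9' then runsAux cs (cur ++ [c])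
    else if cur = [] then runsAux cs [] else cur :: runsAux cs []

def finishRuns (p : List (List Char) × List Char) : List (List Char) :=
  if p.2 = [] then p.1 else p.1 ++ [p.2]

def bestF (rs : List (List Char)) (b : List Char) : List Char :=
  rs.foldl (fun best r => if best.length ≤ r.length then r else best) b

lemma runsAux_digit (c : Char) (cs cur : List Char) (hd : '0' ≤ c ∧ c ≤ '9') :
    runsAux (c :: cs) cur = runsAux cs (cur ++ [c]) := by
  simp [runsAux, hd]

lemma runsAux_nondigit (c : Char) (cs cur : List Char) (hd : ¬('0' ≤ c ∧ c ≤ '9')) :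
    runsAux (c :: cs) cur = if cur = [] then runsAux cs [] else cur :: runsAux cs [] := by
  simp [runsAux, hd]

lemma runStep_runsAux (cs : List Char) (rs : List (List Char)) (cur : List Char) :
    finishRuns (cs.foldl runStep (rs, cur)) = rs ++ runsAux cs cur := by
  induction cs generalizing rs cur with
  | nil =>
    by_cases hc : cur = [] <;> simp [finishRuns, runsAux, hc]
  | cons c cs ih =>
    simp only [List.foldl_cons, runStep]
    by_cases hd : '0' ≤ c ∧ c ≤ '9'
    · rw [if_pos hd, runsAux_digit c cs cur hd]
      exact ih rs (cur ++ [c])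
    · rw [if_neg hd, runsAux_nondigit c cs cur hd]
      by_cases hc : cur = []
      · simp only [hc]
        exact ih rs []
      · simp only [if_neg hc]
        rw [ih (rs ++ [cur]) []]
        simp

-- the first run of runsAux cs cur extends cur when cur is nonempty
lemma runsAux_head (cs : List Char) (cur : List Char) (h : cur ≠ []) :
    ∃ t rest, runsAux cs cur = (cur ++ t) :: rest := by
  induction cs generalizing cur with
  | nil => exact ⟨[], [], by simp [runsAux, h]⟩
  | cons c cs ih =>
    by_cases hd : '0' ≤ c ∧ c ≤ '9'
    · obtain ⟨t, rest, ht⟩ := ih (cur ++ [c]) (by simp)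
      exact ⟨[c] ++ t, rest, by rw [runsAux_digit c cs cur hd, ht]; simp⟩
    · exact ⟨[], runsAux cs [], by rw [runsAux_nondigit c cs cur hd, if_neg h]; simp⟩

-- main invariant: A's fused loop equals "best of the remaining runs" from any reachable state
lemma loopA_eq_best (cs : List Char) (res tmp : List Char)
    (h1 : tmp.length ≤ res.length)
    (h2 : tmp ≠ [] → res.length ≤ tmp.length → res = tmp) :
    (cs.foldl findigitsLoop (res, tmp)).1 = bestF (runsAux cs tmp) res := by
  induction cs generalizing res tmp with
  | nil =>
    simp only [List.foldl_nil]
    by_cases ht : tmp = []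
    · simp [runsAux, ht, bestF]
    · simp only [runsAux, if_neg ht, bestF, List.foldl_cons, List.foldl_nil]
      by_cases hle : res.length ≤ tmp.length
      · rw [if_pos hle]; exact h2 ht hle
      · rw [if_neg hle]
  | cons c cs ih =>
    simp only [List.foldl_cons, findigitsLoop]
    by_cases hd : '0' ≤ c ∧ c ≤ '9'
    · simp only [if_pos hd]
      rw [runsAux_digit c cs tmp hd]
      by_cases hle : res.length ≤ (tmp ++ [c]).length
      · rw [if_pos hle, ih (tmp ++ [c]) (tmp ++ [c]) le_rfl (fun _ _ => rfl)]
        obtain ⟨t, rest, ht⟩ := runsAux_head cs (tmp ++ [c]) (by simp)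
        rw [ht]
        simp only [bestF, List.foldl_cons]
        have l1 : (tmp ++ [c]).length ≤ (tmp ++ [c] ++ t).length := by simp
        rw [if_pos l1, if_pos (le_trans hle l1)]
      · rw [if_neg hle]
        exact ih res (tmp ++ [c])
          (by simp only [List.length_append, List.length_cons, List.length_nil] at hle ⊢; omega)
          (fun _ h' => absurd h' hle)
    · simp only [if_neg hd]
      have hres : (if res.length ≤ (List.nil (α := Char)).length then (List.nil (α := Char)) else res) = res := by
        cases res with
        | nil => simp
        | cons a l => simp
      rw [hres, ih res [] (by simp) (by simp), runsAux_nondigit c cs tmp hd]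
      by_cases htm : tmp = []
      · rw [if_pos htm]
      · rw [if_neg htm]
        simp only [bestF, List.foldl_cons]
        by_cases hle : res.length ≤ tmp.length
        · rw [if_pos hle, h2 htm hle]
        · rw [if_neg hle]

-- ===== VERDICT (by name: the statement is the Claim_ definition above) =====
theorem findigits_spec : Claim_equal_findigits := by
  intro str _
  show findigits str = findigits_alt str
  show String.ofList (str.toList.foldl findigitsLoop ([], [])).1
      = String.ofList (bestF (finishRuns (str.toList.foldl runStep ([], []))) [])
  rw [runStep_runsAux str.toList [] [],
    loopA_eq_best str.toList [] [] (by simp) (by simp)]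
  rfl
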